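-- pv_equiv track=rewrite | github.com/spsanps/nanoSmol | fVLM/scripts/archive/find_crossover.py | flops_query_attention
-- ===== SOURCE A (Python) =====
-- DINO_DIM = 384
--
-- def flops_linear(in_dim, out_dim, batch=1):
--     return 2 * batch * in_dim * out_dim
--
-- def flops_query_attention(num_patches, query_layers=12):
--     """Query attention cost. Can vary number of layers."""
--     total = 0
--     for _ in range(query_layers):
--         q_proj = flops_linear(DINO_DIM, DINO_DIM, 1)
--         kv_proj = 2 * flops_linear(DINO_DIM, DINO_DIM, num_patches)
--         scores = 2 * 1 * num_patches * DINO_DIM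
--         weighted = 2 * 1 * num_patches * DINO_DIM
--         out_proj = flops_linear(DINO_DIM, DINO_DIM, 1)
--         total += q_proj + kv_proj + scores + weighted + out_proj
--     return total
-- ===== SOURCE B (Python) =====
-- DINO_DIM = 384
--
-- def flops_query_attention(num_patches, query_layers=12):
--     """Closed form: every layer costs the same, so multiply by the layer count."""
--     layers = max(query_layers, 0)
--     per_layer = 4 * DINO_DIM * DINO_DIM + (4 * DINO_DIM * DINO_DIM + 4 * DINO_DIM) * num_patches
--     return layers * per_layer
-- ===== Notes on version B (the rewrite author's own statement) =====
-- stated objective: faster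
-- what changed: Replaced the per-layer loop (which adds the same layer-constant cost each iteration) by the closed form max(query_layers,0) * per_layer_cost.
import Mathlib
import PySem

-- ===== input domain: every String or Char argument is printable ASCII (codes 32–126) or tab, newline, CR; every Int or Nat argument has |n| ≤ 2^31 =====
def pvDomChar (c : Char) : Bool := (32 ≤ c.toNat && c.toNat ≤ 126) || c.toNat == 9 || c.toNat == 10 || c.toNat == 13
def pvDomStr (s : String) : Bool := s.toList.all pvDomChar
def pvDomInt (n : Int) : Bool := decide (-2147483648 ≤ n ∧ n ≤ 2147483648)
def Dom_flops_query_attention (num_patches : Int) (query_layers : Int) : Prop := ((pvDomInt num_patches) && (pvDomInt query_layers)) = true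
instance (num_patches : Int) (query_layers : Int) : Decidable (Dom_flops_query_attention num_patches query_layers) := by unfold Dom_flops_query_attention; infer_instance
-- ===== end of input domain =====

-- B replaces the per-layer loop by a closed form (layer count times per-layer cost): asymptotically faster.
-- ===== PORT A =====
def DINO_DIM : Int := 384

def flops_linear (in_dim : Int) (out_dim : Int) (batch : Int) : Int :=
  2 * batch * in_dim * out_dim

def flops_query_attention (num_patches : Int) (query_layers : Int) : Int :=
  (PySem.List.pyRange 0 query_layers 1).foldl
    (fun total _ =>
      let q_proj := flops_linear DINO_DIM DINO_DIM 1
      let kv_proj := 2 * flops_linear DINO_DIM DINO_DIM num_patches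
      let scores := 2 * 1 * num_patches * DINO_DIM
      let weighted := 2 * 1 * num_patches * DINO_DIM
      let out_proj := flops_linear DINO_DIM DINO_DIM 1
      total + (q_proj + kv_proj + scores + weighted + out_proj))
    0

-- ===== PORT B =====
def flops_query_attention_alt (num_patches : Int) (query_layers : Int) : Int :=
  let layers := max query_layers 0
  let per_layer := 4 * DINO_DIM * DINO_DIM + (4 * DINO_DIM * DINO_DIM + 4 * DINO_DIM) * num_patches
  layers * per_layer

-- ===== PRECONDITION & SPEC =====
def Spec_flops_query_attention (num_patches : Int) (query_layers : Int) (out : Int) : Prop := out = flops_query_attention_alt num_patches query_layers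
instance (num_patches : Int) (query_layers : Int) (out : Int) : Decidable (Spec_flops_query_attention num_patches query_layers out) := by unfold Spec_flops_query_attention; infer_instance

-- ===== CLAIM (what is proved, stated in full; the proofs are below) =====
def Claim_equal_flops_query_attention : Prop := ∀ (num_patches : Int) (query_layers : Int), Dom_flops_query_attention num_patches query_layers → Spec_flops_query_attention num_patches query_layers (flops_query_attention num_patches query_layers)

-- ===== LEMMAS AND PROOFS =====

-- ===== VERDICT (by name: the statement is the Claim_ definition above) =====
-- the loop adds a fixed constant c each iteration: foldl = length * c + init
theorem foldl_add_const (c : Int) (l : List Int) (init : Int) :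
    l.foldl (fun t _ => t + c) init = init + l.length * c := by
  induction l generalizing init with
  | nil => simp
  | cons x xs ih => simp [List.foldl, ih]; ring

theorem flops_query_attention_spec : Claim_equal_flops_query_attention := by
  intro n q _
  unfold Spec_flops_query_attention flops_query_attention flops_query_attention_alt
  rw [foldl_add_const]
  simp [PySem.List.length_pyRange_one, DINO_DIM, flops_linear]
  left; ring
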